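-- pv_equiv track=rewrite | github.com/leleoaraxa/mosaic | scripts/audit_columns.py | infer_suffix
-- ===== SOURCE A (Python) =====
-- SUFFIX_MAP = {
--     "date": ("_date", "_until", "_at"),
--     "amt": ("_amt",),
--     "price": ("_price",),
--     "pct": ("_pct",),
--     "area": ("_area",),
--     "value": ("_value",),
--     "ratio": ("_ratio",),
--     "rate": ("_rate",),
--     "share": ("_share",),
--     "alpha": ("_alpha",),
--     "index": ("_index",),
--     "count": ("_count",),
-- }
--
-- LEGACY_SUFFIXES = {"_amount"}
--
-- def infer_suffix(name: str) -> str: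
--     for suffix_class, suffixes in SUFFIX_MAP.items():
--         for suf in suffixes:
--             if name.endswith(suf):
--                 return suffix_class
--     for suf in LEGACY_SUFFIXES:
--         if name.endswith(suf):
--             return f"legacy:{suf}"
--     return "generic"
-- ===== SOURCE B (Python) =====
-- SUFFIX_TO_CLASS = {
--     "_date": "date", "_until": "date", "_at": "date",
--     "_amt": "amt", "_price": "price", "_pct": "pct", "_area": "area",
--     "_value": "value", "_ratio": "ratio", "_rate": "rate",
--     "_share": "share", "_alpha": "alpha", "_index": "index",
--     "_count": "count", "_amount": "legacy:_amount",
-- }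
--
-- SUFFIX_LENGTHS = sorted({len(s) for s in SUFFIX_TO_CLASS})
--
-- def infer_suffix(name: str) -> str:
--     for L in SUFFIX_LENGTHS:
--         cls = SUFFIX_TO_CLASS.get(name[-L:])
--         if cls is not None:
--             return cls
--     return "generic"
-- ===== Notes on version B (the rewrite author's own statement) =====
-- stated objective: idiomatic
-- what changed: A scans all 15 suffixes with endswith in two class-grouped loops; B precomputes a flat suffix->class dict plus the distinct suffix lengths and, for each length L, takes the tail name[-L:] and does one dict lookup, which is correct in any order because no suffix is a tail of another.
import Mathlib
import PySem

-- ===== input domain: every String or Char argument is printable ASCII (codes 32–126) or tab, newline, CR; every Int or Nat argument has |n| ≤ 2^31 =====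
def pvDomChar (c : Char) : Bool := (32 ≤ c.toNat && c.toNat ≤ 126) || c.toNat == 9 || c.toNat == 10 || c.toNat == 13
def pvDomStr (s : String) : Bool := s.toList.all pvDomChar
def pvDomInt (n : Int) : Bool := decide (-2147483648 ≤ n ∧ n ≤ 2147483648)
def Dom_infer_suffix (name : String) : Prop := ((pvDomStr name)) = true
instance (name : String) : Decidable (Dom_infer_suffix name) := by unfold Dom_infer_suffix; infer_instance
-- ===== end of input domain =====

-- B replaces A's two class-grouped endswith scans by a flat suffix->class dict probed once per distinct suffix length (alternative/idiomatic; same cost at this size).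

-- ===== PORT A =====
def sufMapA : List (String × List String) := [
  ("date", ["_date", "_until", "_at"]),
  ("amt", ["_amt"]), ("price", ["_price"]), ("pct", ["_pct"]),
  ("area", ["_area"]), ("value", ["_value"]), ("ratio", ["_ratio"]),
  ("rate", ["_rate"]), ("share", ["_share"]), ("alpha", ["_alpha"]),
  ("index", ["_index"]), ("count", ["_count"])]

def legacySuffixesA : PySem.Set String := PySem.Set.ofList ["_amount"]

-- inner 'for suf in suffixes: if name.endswith(suf): return suffix_class'
def tupleScanA (name cls : String) : List String → Option String
  | [] => none
  | suf :: rest => if PySem.Str.endswith name suf then some cls else tupleScanA name cls rest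

-- outer 'for suffix_class, suffixes in SUFFIX_MAP.items(): …'
def mapScanA (name : String) : List (String × List String) → Option String
  | [] => none
  | (cls, sufs) :: rest =>
    match tupleScanA name cls sufs with
    | some r => some r
    | none => mapScanA name rest

-- 'for suf in LEGACY_SUFFIXES: if name.endswith(suf): return f"legacy:{suf}"'
def legacyScanA (name : String) : List String → Option String
  | [] => none
  | suf :: rest => if PySem.Str.endswith name suf then some ("legacy:" ++ suf) else legacyScanA name rest

def infer_suffix (name : String) : String :=
  match mapScanA name sufMapA with
  | some r => r
  | none =>
    match legacyScanA name legacySuffixesA with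
    | some r => r
    | none => "generic"

-- ===== PORT B =====
def suffixToClass : PySem.Dict String String := PySem.Dict.ofList [
  ("_date", "date"), ("_until", "date"), ("_at", "date"),
  ("_amt", "amt"), ("_price", "price"), ("_pct", "pct"), ("_area", "area"),
  ("_value", "value"), ("_ratio", "ratio"), ("_rate", "rate"),
  ("_share", "share"), ("_alpha", "alpha"), ("_index", "index"),
  ("_count", "count"), ("_amount", "legacy:_amount")]

-- SUFFIX_LENGTHS = sorted({len(s) for s in SUFFIX_TO_CLASS})
def suffixLengths : List Int :=
  PySem.List.sorted (PySem.Set.ofList ((suffixToClass.items).map (fun p => PySem.Str.len p.1))) id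

-- 'for L in SUFFIX_LENGTHS: cls = SUFFIX_TO_CLASS.get(name[-L:]); if cls is not None: return cls'
def lenScanB (name : String) : List Int → String
  | [] => "generic"
  | L :: rest =>
    match suffixToClass.get? (PySem.Str.slice name (some (-L)) none) with
    | some cls => cls
    | none => lenScanB name rest

def infer_suffix_alt (name : String) : String := lenScanB name suffixLengths

-- ===== PRECONDITION & SPEC =====
def Spec_infer_suffix (name : String) (out : String) : Prop := out = infer_suffix_alt name
instance (name : String) (out : String) : Decidable (Spec_infer_suffix name out) := by unfold Spec_infer_suffix; infer_instance

-- ===== CLAIM (what is proved, stated in full; the proofs are below) =====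
def Claim_equal_infer_suffix : Prop := ∀ (name : String), Dom_infer_suffix name → Spec_infer_suffix name (infer_suffix name)

-- ===== LEMMAS AND PROOFS =====

-- the common suffix->class table, in both programs' shared scan order
def sufClass : List (String × String) := [
  ("_date", "date"), ("_until", "date"), ("_at", "date"),
  ("_amt", "amt"), ("_price", "price"), ("_pct", "pct"), ("_area", "area"),
  ("_value", "value"), ("_ratio", "ratio"), ("_rate", "rate"),
  ("_share", "share"), ("_alpha", "alpha"), ("_index", "index"),
  ("_count", "count"), ("_amount", "legacy:_amount")]

-- a first-match chain over (guard, value) rows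
def chainD (l : List (Bool × String)) (d : String) : String :=
  l.foldr (fun p acc => if p.1 then p.2 else acc) d

-- A's rows: one endswith guard per suffix, in A's scan order
def rowsA (name : String) : List (Bool × String) :=
  sufClass.map (fun e => (PySem.Str.endswith name e.1, e.2))

-- B's rows: for each length, one tail-equality guard per dict key
def rowsB (name : String) : List (Bool × String) :=
  suffixLengths.flatMap (fun L =>
    sufClass.map (fun e => (e.1 == PySem.Str.slice name (some (-L)) none, e.2)))

lemma chainD_append (l1 l2 : List (Bool × String)) (d : String) :
    chainD (l1 ++ l2) d = chainD l1 (chainD l2 d) := by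
  simp [chainD, List.foldr_append]

lemma chainD_cons (p : Bool × String) (l : List (Bool × String)) (d : String) :
    chainD (p :: l) d = if p.1 then p.2 else chainD l d := rfl

lemma chainD_of_all_false (l : List (Bool × String)) (d : String)
    (h : ∀ p ∈ l, p.1 = false) : chainD l d = d := by
  induction l with
  | nil => rfl
  | cons p rest ih =>
    rw [chainD_cons, h p (List.mem_cons_self ..)]
    simp only [Bool.false_eq_true, if_false]
    exact ih (fun q hq => h q (List.mem_cons_of_mem _ hq))

lemma chainD_first_true (l : List (Bool × String)) (d : String)
    (h : ∃ p ∈ l, p.1 = true) : ∃ p ∈ l, p.1 = true ∧ chainD l d = p.2 := by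
  induction l with
  | nil => simp at h
  | cons p rest ih =>
    by_cases hp : p.1 = true
    · exact ⟨p, List.mem_cons_self .., hp, by rw [chainD_cons, if_pos hp]⟩
    · have hrest : ∃ q ∈ rest, q.1 = true := by
        rcases h with ⟨q, hq, hqt⟩
        rcases List.mem_cons.mp hq with rfl | hq'
        · exact absurd hqt hp
        · exact ⟨q, hq', hqt⟩
      rcases ih hrest with ⟨q, hq, hqt, hval⟩
      exact ⟨q, List.mem_cons_of_mem _ hq, hqt, by rw [chainD_cons, if_neg hp]; exact hval⟩

lemma chainD_congr (l1 l2 : List (Bool × String)) (d : String)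
    (hex : (∃ p ∈ l1, p.1 = true) ↔ (∃ q ∈ l2, q.1 = true))
    (hval : ∀ p ∈ l1, ∀ q ∈ l2, p.1 = true → q.1 = true → p.2 = q.2) :
    chainD l1 d = chainD l2 d := by
  by_cases h : ∃ p ∈ l1, p.1 = true
  · rcases chainD_first_true l1 d h with ⟨p, hp, hpt, hv1⟩
    rcases chainD_first_true l2 d (hex.mp h) with ⟨q, hq, hqt, hv2⟩
    rw [hv1, hv2]; exact hval p hp q hq hpt hqt
  · have h2 : ¬ ∃ q ∈ l2, q.1 = true := fun h2 => h (hex.mpr h2)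
    rw [chainD_of_all_false l1 d, chainD_of_all_false l2 d]
    · intro q hq; cases hqt : q.1
      · rfl
      · exact absurd ⟨q, hq, hqt⟩ h2
    · intro p hp; cases hpt : p.1
      · rfl
      · exact absurd ⟨p, hp, hpt⟩ h

-- ==== A = chainD rowsA ====

lemma tupleScanA_chain (name cls : String) (sufs : List String) (d : String) :
    (match tupleScanA name cls sufs with | some r => r | none => d)
      = chainD (sufs.map (fun s => (PySem.Str.endswith name s, cls))) d := by
  induction sufs with
  | nil => simp [tupleScanA, chainD]
  | cons s rest ih =>
    cases h : PySem.Chars.endswith name.toList s.toList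
    · simp only [tupleScanA, PySem.Str.endswith_eq, h, Bool.false_eq_true, if_false]
      rw [ih]
      simp [chainD, h]
    · simp [tupleScanA, chainD, h]

lemma mapScanA_chain (name : String) (m : List (String × List String)) (d : String) :
    (match mapScanA name m with | some r => r | none => d)
      = chainD (m.flatMap (fun p => p.2.map (fun s => (PySem.Str.endswith name s, p.1)))) d := by
  induction m with
  | nil => simp [mapScanA, chainD]
  | cons p rest ih =>
    obtain ⟨cls, sufs⟩ := p
    rw [List.flatMap_cons, chainD_append]
    rw [← tupleScanA_chain name cls sufs, ← ih]
    cases htup : tupleScanA name cls sufs <;> simp [mapScanA, htup]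

lemma legacyScanA_chain (name : String) (ls : List String) (d : String) :
    (match legacyScanA name ls with | some r => r | none => d)
      = chainD (ls.map (fun s => (PySem.Str.endswith name s, "legacy:" ++ s))) d := by
  induction ls with
  | nil => simp [legacyScanA, chainD]
  | cons s rest ih =>
    cases h : PySem.Chars.endswith name.toList s.toList
    · simp only [legacyScanA, PySem.Str.endswith_eq, h, Bool.false_eq_true, if_false]
      rw [ih]
      simp [chainD, h]
    · simp [legacyScanA, chainD, h]

lemma A_eq_chain (name : String) : infer_suffix name = chainD (rowsA name) "generic" := by
  have hleg : (match legacyScanA name legacySuffixesA with | some r => r | none => "generic")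
      = chainD [(PySem.Str.endswith name "_amount", "legacy:_amount")] "generic" := by
    rw [show (legacySuffixesA : List String) = ["_amount"] from rfl, legacyScanA_chain]
    simp only [List.map_cons, List.map_nil]
    rw [show ("legacy:" ++ "_amount" : String) = "legacy:_amount" from by decide]
  have := mapScanA_chain name sufMapA (chainD [(PySem.Str.endswith name "_amount", "legacy:_amount")] "generic")
  have hrows : rowsA name
      = (sufMapA.flatMap (fun p => p.2.map (fun s => (PySem.Str.endswith name s, p.1))))
        ++ [(PySem.Str.endswith name "_amount", "legacy:_amount")] := by
    simp [rowsA, sufClass, sufMapA]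
  rw [hrows, chainD_append, ← this, ← hleg]
  unfold infer_suffix
  cases hmap : mapScanA name sufMapA
  · simp [hmap]
  · simp

-- ==== B = chainD rowsB ====

lemma items_suffixToClass : suffixToClass.items = sufClass := by decide

lemma get?_chain (d : String) (t : String) (es : List (String × String)) :
    (match (PySem.Dict.mk es).get? t with | some c => c | none => d)
      = chainD (es.map (fun e => (e.1 == t, e.2))) d := by
  induction es with
  | nil => simp [PySem.Dict.get?, chainD]
  | cons e rest ih =>
    by_cases h : (e.1 == t) = true
    · simp [PySem.Dict.get?, List.find?, chainD, h]
    · simp only [Bool.not_eq_true] at h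
      simp [PySem.Dict.get?, List.find?, chainD, h] at *
      exact ih

lemma lenScanB_chain (name : String) (Ls : List Int) :
    lenScanB name Ls
      = chainD (Ls.flatMap (fun L =>
          sufClass.map (fun e => (e.1 == PySem.Str.slice name (some (-L)) none, e.2)))) "generic" := by
  induction Ls with
  | nil => simp [lenScanB, chainD]
  | cons L rest ih =>
    rw [List.flatMap_cons, chainD_append, ← ih]
    rw [← get?_chain (lenScanB name rest) (PySem.Str.slice name (some (-L)) none) sufClass]
    rw [← items_suffixToClass]
    cases hg : suffixToClass.get? (PySem.Str.slice name (some (-L)) none) <;>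
      simp [lenScanB, hg]

lemma B_eq_chain (name : String) : infer_suffix_alt name = chainD (rowsB name) "generic" := by
  rw [infer_suffix_alt, lenScanB_chain, rowsB]

-- ==== suffix semantics of the guards ====

lemma suffixLengths_eq : suffixLengths = [3, 4, 5, 6, 7] := by decide

lemma slice_neg_suffix (xs : List Char) (L : Int) (hL : 0 < L) :
    PySem.List.slice xs (some (-L)) none <:+ xs := by
  have h1 : L = ((L.toNat : Nat) : Int) := by omega
  rw [h1, PySem.List.slice_from_neg_natCast xs L.toNat (by omega)]
  exact List.drop_suffix _ _

lemma endswith_of_tail_eq (name k : String) (L : Int) (hL : 0 < L)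
    (h : (k == PySem.Str.slice name (some (-L)) none) = true) :
    PySem.Str.endswith name k = true := by
  have hk : k = PySem.Str.slice name (some (-L)) none := beq_iff_eq.mp h
  rw [PySem.Str.endswith_eq, PySem.Chars.endswith_iff, hk]
  have := PySem.Str.toList_slice name (some (-L)) none
  rw [this, PySem.Chars.slice_eq_listSlice]
  exact slice_neg_suffix _ L hL

lemma tail_eq_of_endswith (name k : String) (L : Int) (hL : 0 < L)
    (hlen : k.toList.length = L.toNat)
    (h : PySem.Str.endswith name k = true) :
    (k == PySem.Str.slice name (some (-L)) none) = true := by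
  rw [PySem.Str.endswith_eq, PySem.Chars.endswith_iff] at h
  have hdrop : k.toList = List.drop (name.toList.length - k.toList.length) name.toList :=
    List.suffix_iff_eq_drop.mp h
  have hslice : (PySem.Str.slice name (some (-L)) none).toList = k.toList := by
    rw [PySem.Str.toList_slice, PySem.Chars.slice_eq_listSlice]
    have h1 : L = ((L.toNat : Nat) : Int) := by omega
    rw [h1, PySem.List.slice_from_neg_natCast name.toList L.toNat (by omega)]
    rw [← hlen, ← hdrop]
  exact beq_iff_eq.mpr (String.toList_inj.mp hslice).symm

lemma suffix_of_suffixes (l s1 s2 : List Char) (h1 : s1 <:+ l) (h2 : s2 <:+ l)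
    (hle : s1.length ≤ s2.length) : s1 <:+ s2 := by
  have p1 : s1.reverse <+: l.reverse := List.reverse_prefix.mpr h1
  have p2 : s2.reverse <+: l.reverse := List.reverse_prefix.mpr h2
  have := List.prefix_of_prefix_length_le p1 p2 (by simpa using hle)
  exact List.reverse_prefix.mp this

-- two table suffixes that both match give the same class
lemma val_unique (name : String) (e1 e2 : String × String)
    (h1 : e1 ∈ sufClass) (h2 : e2 ∈ sufClass)
    (ht1 : PySem.Str.endswith name e1.1 = true)
    (ht2 : PySem.Str.endswith name e2.1 = true) : e1.2 = e2.2 := by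
  rw [PySem.Str.endswith_eq, PySem.Chars.endswith_iff] at ht1 ht2
  simp only [sufClass, List.mem_cons, List.not_mem_nil, or_false] at h1 h2
  rcases h1 with rfl|rfl|rfl|rfl|rfl|rfl|rfl|rfl|rfl|rfl|rfl|rfl|rfl|rfl|rfl <;>
    rcases h2 with rfl|rfl|rfl|rfl|rfl|rfl|rfl|rfl|rfl|rfl|rfl|rfl|rfl|rfl|rfl <;>
    simp only at ht1 ht2 ⊢ <;>
    first
      | rfl
      | exact absurd (suffix_of_suffixes _ _ _ ht1 ht2 (by decide)) (by decide)
      | exact absurd (suffix_of_suffixes _ _ _ ht2 ht1 (by decide)) (by decide)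

lemma rowsB_true_endswith (name : String) (q : Bool × String) (hq : q ∈ rowsB name)
    (hqt : q.1 = true) : ∃ e ∈ sufClass, q.2 = e.2 ∧ PySem.Str.endswith name e.1 = true := by
  rw [rowsB, suffixLengths_eq] at hq
  rcases List.mem_flatMap.mp hq with ⟨L, hL, hq'⟩
  rcases List.mem_map.mp hq' with ⟨e, he, rfl⟩
  have hLpos : (0:Int) < L := by
    simp only [List.mem_cons, List.not_mem_nil, or_false] at hL
    rcases hL with rfl|rfl|rfl|rfl|rfl <;> norm_num
  exact ⟨e, he, rfl, endswith_of_tail_eq name e.1 L hLpos hqt⟩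

-- ==== main equivalence ====

lemma chain_rowsA_eq_rowsB (name : String) :
    chainD (rowsA name) "generic" = chainD (rowsB name) "generic" := by
  apply chainD_congr
  · constructor
    · rintro ⟨p, hp, hpt⟩
      rcases List.mem_map.mp hp with ⟨e, he, rfl⟩
      have hlen : ∃ L : Int, 0 < L ∧ e.1.toList.length = L.toNat ∧ L ∈ suffixLengths := by
        rw [suffixLengths_eq]
        simp only [sufClass, List.mem_cons, List.not_mem_nil, or_false] at he
        rcases he with rfl|rfl|rfl|rfl|rfl|rfl|rfl|rfl|rfl|rfl|rfl|rfl|rfl|rfl|rfl <;>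
          first
            | exact ⟨3, by norm_num, by decide, by decide⟩
            | exact ⟨4, by norm_num, by decide, by decide⟩
            | exact ⟨5, by norm_num, by decide, by decide⟩
            | exact ⟨6, by norm_num, by decide, by decide⟩
            | exact ⟨7, by norm_num, by decide, by decide⟩
      rcases hlen with ⟨L, hLpos, hLlen, hLmem⟩
      refine ⟨(e.1 == PySem.Str.slice name (some (-L)) none, e.2), ?_, ?_⟩
      · rw [rowsB]
        exact List.mem_flatMap.mpr ⟨L, hLmem, List.mem_map.mpr ⟨e, he, rfl⟩⟩
      · exact tail_eq_of_endswith name e.1 L hLpos hLlen hpt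
    · rintro ⟨q, hq, hqt⟩
      rcases rowsB_true_endswith name q hq hqt with ⟨e, he, _, hend⟩
      exact ⟨(PySem.Str.endswith name e.1, e.2), List.mem_map.mpr ⟨e, he, rfl⟩, hend⟩
  · intro p hp q hq hpt hqt
    rcases List.mem_map.mp hp with ⟨e1, he1, rfl⟩
    rcases rowsB_true_endswith name q hq hqt with ⟨e2, he2, hq2, hend2⟩
    rw [hq2]
    exact val_unique name e1 e2 he1 he2 hpt hend2

-- ===== VERDICT (by name: the statement is the Claim_ definition above) =====
theorem infer_suffix_spec : Claim_equal_infer_suffix := by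
  intro name _
  unfold Spec_infer_suffix
  rw [A_eq_chain, B_eq_chain, chain_rowsA_eq_rowsB]
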